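-- pv_equiv track=rewrite | github.com/home-assistant/core | homeassistant/components/micropel/helper/crypto.py | __convert_password
-- ===== SOURCE A (Python) =====
-- def __convert_password(password: int) -> int:
--     if password == 0:
--         return 0
--     p_byte = [0] * 4
--     for i in range(4):
--         p_byte[i] = password & 0x1F
--         password >>= 5
--         if p_byte[i] < 3:
--             p_byte[i] = p_byte[i] + (9 + 4 * i)
--     for i in range(4):
--         password <<= 5
--         password |= p_byte[3 - i]
--     return password
-- ===== SOURCE B (Python) =====
-- def __convert_password(password: int) -> int:
--     if password == 0:
--         return 0
--     return _encode(password, 0)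
--
--
-- def _encode(p: int, i: int) -> int:
--     if i == 4:
--         return p
--     d = p % 32
--     if d < 3:
--         d += 9 + 4 * i
--     return _encode(p // 32, i + 1) * 32 + d
-- ===== Notes on version B (the rewrite author's own statement) =====
-- stated objective: alternative
-- what changed: B replaces A's bitwise two-loop scheme (extract the four 5-bit chunks with & and >> into a p_byte array, then a mirrored shift-and-OR recombination loop) with a recursive base-32 divmod formulation: each recursion level peels the low base-32 digit with % and //, adjusts it, and rebuilds the number arithmetically (*32 + digit) on the way back, with no bit operations and no intermediate array.
import Mathlib
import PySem

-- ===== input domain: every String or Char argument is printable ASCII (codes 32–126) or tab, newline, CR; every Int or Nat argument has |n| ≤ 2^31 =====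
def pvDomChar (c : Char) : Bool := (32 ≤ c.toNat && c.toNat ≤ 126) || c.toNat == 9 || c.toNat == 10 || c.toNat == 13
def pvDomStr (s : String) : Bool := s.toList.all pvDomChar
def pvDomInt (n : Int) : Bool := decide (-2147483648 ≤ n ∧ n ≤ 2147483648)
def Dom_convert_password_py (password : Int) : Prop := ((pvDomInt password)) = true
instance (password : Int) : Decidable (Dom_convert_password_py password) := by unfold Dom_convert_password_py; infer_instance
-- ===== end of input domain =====

-- B replaces A's bitwise extract-array / shift-OR-recombine loops by a recursive base-32 divmod
-- peel-and-rebuild (no bit operations, no array); objective: alternative, same cost.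

-- ===== PORT A =====
def convert_password_py (password : Int) : Int :=
  if password = 0 then 0
  else
    -- p_byte = [0] * 4 ; for i in range(4): p_byte[i] = password & 0x1F; password >>= 5; if p_byte[i] < 3: p_byte[i] += 9 + 4*i
    let st := (PySem.List.pyRange 0 4 1).foldl
      (fun (st : List Int × Int) (i : Int) =>
        let p_byte := PySem.List.pySetD st.1 i (PySem.Int.band st.2 0x1F)
        let password := st.2 >>> (5 : Nat)
        let p_byte :=
          if PySem.List.pyGetD p_byte i 0 < 3 then
            PySem.List.pySetD p_byte i (PySem.List.pyGetD p_byte i 0 + (9 + 4 * i))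
          else p_byte
        (p_byte, password))
      (List.replicate 4 0, password)
    -- for i in range(4): password <<= 5; password |= p_byte[3 - i]
    (PySem.List.pyRange 0 4 1).foldl
      (fun (password : Int) (i : Int) =>
        PySem.Int.bor (password <<< (5 : Nat)) (PySem.List.pyGetD st.1 (3 - i) 0))
      st.2

-- ===== PORT B =====
-- _encode(p, i): Python's base case `if i == 4: return p` is written `4 ≤ i` so the recursion is
-- total in Lean; all reachable calls have i ≤ 4, where the two conditions agree.
def convert_password_py_encode (p : Int) (i : Int) : Int :=
  if 4 ≤ i then p
  else
    let d := PySem.Int.mod p 32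
    let d := if d < 3 then d + (9 + 4 * i) else d
    convert_password_py_encode (PySem.Int.floordiv p 32) (i + 1) * 32 + d
termination_by (4 - i).toNat
decreasing_by omega

def convert_password_py_alt (password : Int) : Int :=
  if password = 0 then 0 else convert_password_py_encode password 0

-- ===== PRECONDITION & SPEC =====
def Spec_convert_password_py (password : Int) (out : Int) : Prop := out = convert_password_py_alt password
instance (password : Int) (out : Int) : Decidable (Spec_convert_password_py password out) := by unfold Spec_convert_password_py; infer_instance

-- ===== CLAIM (what is proved, stated in full; the proofs are below) =====
def Claim_equal_convert_password_py : Prop := ∀ (password : Int), Dom_convert_password_py password → Spec_convert_password_py password (convert_password_py password)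

-- ===== LEMMAS AND PROOFS =====

-- a &&& b = 0 → a + b = a ||| b (disjoint bits add like OR)
theorem pv_add_eq_or_of_and_eq_zero (a b : Nat) (h : a &&& b = 0) : a + b = a ||| b := by
  induction a using Nat.strongRecOn generalizing b with
  | ind a ih =>
    rcases Nat.eq_zero_or_pos a with ha | ha
    · simp [ha]
    · have h2 : (a/2) &&& (b/2) = 0 := by rw [← Nat.and_div_two, h, Nat.zero_div]
      have ih2 := ih (a/2) (Nat.div_lt_self ha (by norm_num)) (b/2) h2
      have hm : ¬(a % 2 = 1 ∧ b % 2 = 1) := by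
        intro hc
        have h1 := Nat.and_mod_two_eq_one.mpr hc
        rw [h] at h1
        simp at h1
      have e1 := Nat.div_add_mod a 2
      have e2 := Nat.div_add_mod b 2
      have e3 : a ||| b = 2*((a/2) ||| (b/2)) + (a|||b)%2 := by
        conv_lhs => rw [← Nat.div_add_mod (a|||b) 2]
        rw [Nat.or_div_two]
      have e4 : (a|||b)%2 = 1 ↔ (a%2 = 1 ∨ b%2 = 1) := Nat.or_mod_two_eq_one
      have m1 : a % 2 < 2 := Nat.mod_lt _ (by norm_num)
      have m2 : b % 2 < 2 := Nat.mod_lt _ (by norm_num)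
      have m3 : (a|||b) % 2 < 2 := Nat.mod_lt _ (by norm_num)
      omega

-- (2^m*c + u) ||| v = 2^m*c + (u ||| v) for u, v < 2^m
theorem pv_nat_or_high (c u v m : Nat) (hu : u < 2^m) (hv : v < 2^m) :
    (2^m*c + u) ||| v = 2^m*c + (u ||| v) := by
  have hor := Nat.or_lt_two_pow hu hv
  apply Nat.eq_of_testBit_eq
  intro j
  rw [Nat.testBit_or, Nat.testBit_two_pow_mul_add c hu j, Nat.testBit_two_pow_mul_add c hor j]
  by_cases hj : j < m
  · simp [hj, Nat.testBit_or]
  · have hvj : v.testBit j = false :=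
      Nat.testBit_lt_two_pow (lt_of_lt_of_le hv (Nat.pow_le_pow_right (by norm_num) (Nat.le_of_not_lt hj)))
    simp [hj, hvj]

-- (2^m*c + w) &&& v = w &&& v for w, v < 2^m
theorem pv_nat_and_high (c w v m : Nat) (hw : w < 2^m) (hv : v < 2^m) :
    (2^m*c + w) &&& v = w &&& v := by
  apply Nat.eq_of_testBit_eq
  intro j
  rw [Nat.testBit_and, Nat.testBit_two_pow_mul_add c hw j, Nat.testBit_and]
  by_cases hj : j < m
  · simp [hj]
  · have hvj : v.testBit j = false :=
      Nat.testBit_lt_two_pow (lt_of_lt_of_le hv (Nat.pow_le_pow_right (by norm_num) (Nat.le_of_not_lt hj)))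
    have hwj : w.testBit j = false :=
      Nat.testBit_lt_two_pow (lt_of_lt_of_le hw (Nat.pow_le_pow_right (by norm_num) (Nat.le_of_not_lt hj)))
    simp [hj, hvj, hwj]

-- u ||| v = u + ((2^m - (u+1)) &&& v) for u, v < 2^m
theorem pv_nat_compl_or (u v m : Nat) (hu : u < 2^m) (hv : v < 2^m) :
    u + ((2^m - (u+1)) &&& v) = u ||| v := by
  have hz : u &&& ((2^m - (u+1)) &&& v) = 0 := by
    apply Nat.eq_of_testBit_eq
    intro j
    rw [Nat.testBit_and, Nat.testBit_and, Nat.testBit_two_pow_sub_succ hu]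
    simp only [Nat.zero_testBit]
    cases u.testBit j <;> simp
  rw [pv_add_eq_or_of_and_eq_zero _ _ hz]
  apply Nat.eq_of_testBit_eq
  intro j
  rw [Nat.testBit_or, Nat.testBit_or, Nat.testBit_and, Nat.testBit_two_pow_sub_succ hu]
  by_cases hj : j < m
  · simp only [hj, decide_true, Bool.true_and]
    cases u.testBit j <;> simp
  · have hvj : v.testBit j = false :=
      Nat.testBit_lt_two_pow (lt_of_lt_of_le hv (Nat.pow_le_pow_right (by norm_num) (Nat.le_of_not_lt hj)))
    simp [hj, hvj]

-- (u &&& v) + ((2^m - (u+1)) &&& v) = v for u, v < 2^m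
theorem pv_nat_partition (u v m : Nat) (hu : u < 2^m) (hv : v < 2^m) :
    (u &&& v) + ((2^m - (u+1)) &&& v) = v := by
  have hz : (u &&& v) &&& ((2^m - (u+1)) &&& v) = 0 := by
    apply Nat.eq_of_testBit_eq
    intro j
    rw [Nat.testBit_and, Nat.testBit_and, Nat.testBit_and, Nat.testBit_two_pow_sub_succ hu]
    simp only [Nat.zero_testBit]
    cases u.testBit j <;> simp
  rw [pv_add_eq_or_of_and_eq_zero _ _ hz]
  apply Nat.eq_of_testBit_eq
  intro j
  rw [Nat.testBit_or, Nat.testBit_and, Nat.testBit_and, Nat.testBit_two_pow_sub_succ hu]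
  by_cases hj : j < m
  · simp only [hj, decide_true, Bool.true_and]
    cases u.testBit j <;> cases v.testBit j <;> simp
  · have hvj : v.testBit j = false :=
      Nat.testBit_lt_two_pow (lt_of_lt_of_le hv (Nat.pow_le_pow_right (by norm_num) (Nat.le_of_not_lt hj)))
    simp [hj, hvj]

-- Python (x*2^n + u) >> k = x*2^(n-k) + (u >> k)
theorem pv_shift_low (x : Int) (u n k : Nat) (hk : k ≤ n) :
    ((x * 2^n + (u:Int)) >>> k) = x * 2^(n-k) + ((u >>> k : Nat) : Int) := by
  rw [Int.shiftRight_eq_div_pow, Nat.shiftRight_eq_div_pow]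
  push_cast [Int.natCast_ediv]
  have h2 : (2:Int)^n = 2^(n-k) * 2^k := by
    rw [← pow_add]
    congr 1
    omega
  rw [h2, ← mul_assoc, add_comm,
    Int.add_mul_ediv_right _ _ (by positivity : ((2:Int)^k) ≠ 0)]
  ring

-- Python (x*2^m + u) & v = u & v for u, v < 2^m
theorem pv_band_low (x : Int) (u v m : Nat) (hu : u < 2^m) (hv : v < 2^m) :
    PySem.Int.band (x * 2^m + (u:Int)) (v:Int) = ((u &&& v : Nat) : Int) := by
  have hp : (0:Int) < 2^m := by positivity
  have hui : (u:Int) < 2^m := by exact_mod_cast hu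
  by_cases hx : 0 ≤ x
  · lift x to ℕ using hx with X
    have hX : (X:Int) * 2^m + (u:Int) = ((2^m*X + u : Nat) : Int) := by push_cast; ring
    rw [hX, PySem.Int.band_natCast]
    exact_mod_cast congrArg (Nat.cast (R := Int)) (pv_nat_and_high X u v m hu hv)
  · have hx' : x < 0 := by omega
    obtain ⟨N, rfl⟩ : ∃ N : Nat, x = -((N:Int)+1) := ⟨(-x-1).toNat, by omega⟩
    have ha : -((N:Int)+1)*2^m + (u:Int) < 0 := by nlinarith
    have hw : u + 1 ≤ 2^m := hu
    have key : -((-((N:Int)+1)*2^m + (u:Int))) - 1 = ((2^m*N + (2^m - (u+1)) : Nat) : Int) := by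
      push_cast [Nat.cast_sub hw]
      ring
    simp only [PySem.Int.band]
    rw [if_neg (not_le.mpr ha), if_pos (by positivity : (0:Int) ≤ (v:Int))]
    rw [key]
    rw [Int.toNat_natCast, Int.toNat_natCast]
    have hand : v &&& (2^m*N + (2^m - (u+1))) = (2^m - (u+1)) &&& v := by
      rw [Nat.and_comm]
      exact pv_nat_and_high N (2^m - (u+1)) v m (by omega) hv
    rw [hand]
    have hpart := pv_nat_partition u v m hu hv
    have hsub : v - ((2^m - (u+1)) &&& v) = u &&& v := by omega
    rw [hsub]

-- Python (x*2^m + u) | v = x*2^m + (u ||| v) for u, v < 2^m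
theorem pv_bor_low (x : Int) (u v m : Nat) (hu : u < 2^m) (hv : v < 2^m) :
    PySem.Int.bor (x * 2^m + (u:Int)) (v:Int) = x * 2^m + ((u ||| v : Nat) : Int) := by
  have hp : (0:Int) < 2^m := by positivity
  have hui : (u:Int) < 2^m := by exact_mod_cast hu
  by_cases hx : 0 ≤ x
  · lift x to ℕ using hx with X
    have hX : (X:Int) * 2^m + (u:Int) = ((2^m*X + u : Nat) : Int) := by push_cast; ring
    rw [hX, PySem.Int.bor_natCast]
    rw [pv_nat_or_high X u v m hu hv]
    push_cast
    ring
  · have hx' : x < 0 := by omega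
    obtain ⟨N, rfl⟩ : ∃ N : Nat, x = -((N:Int)+1) := ⟨(-x-1).toNat, by omega⟩
    have ha : -((N:Int)+1)*2^m + (u:Int) < 0 := by nlinarith
    have hw : u + 1 ≤ 2^m := hu
    have key : -((-((N:Int)+1)*2^m + (u:Int))) - 1 = ((2^m*N + (2^m - (u+1)) : Nat) : Int) := by
      push_cast [Nat.cast_sub hw]
      ring
    simp only [PySem.Int.bor]
    rw [if_neg (not_le.mpr ha), if_pos (by positivity : (0:Int) ≤ (v:Int))]
    rw [key]
    rw [Int.toNat_natCast, Int.toNat_natCast]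
    have hand : 2^m*N + (2^m - (u+1)) &&& v = (2^m - (u+1)) &&& v := by
      exact pv_nat_and_high N (2^m - (u+1)) v m (by omega) hv
    rw [hand]
    have hco := pv_nat_compl_or u v m hu hv
    have hle : (2^m - (u+1)) &&& v ≤ 2^m - (u+1) := Nat.and_le_left
    have hnat : (2^m - (u+1)) - ((2^m - (u+1)) &&& v) + (u ||| v) + 1 = 2^m := by omega
    have hnatInt : (((2^m - (u+1)) - ((2^m - (u+1)) &&& v) : Nat) : Int) + ((u ||| v : Nat) : Int) + 1 = 2^m := by
      exact_mod_cast congrArg (Nat.cast (R := Int)) hnat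
    rw [Nat.add_sub_assoc hle]
    push_cast
    linear_combination -hnatInt

def pvChunk (u k : Nat) : Nat := (u >>> k) &&& 31

def pvAdj (d a : Nat) : Nat := if d < 3 then d + a else d

theorem pv_bor_low0 (x : Int) (v m : Nat) (hv : v < 2^m) :
    PySem.Int.bor (x * 2^m) (v:Int) = x * 2^m + (v:Int) := by
  have h := pv_bor_low x 0 v m (show (0:Nat) < 2^m from by positivity) hv
  simpa using h

theorem pv_cast_if (d k : Nat) (kk : Int) (hk : kk = (k:Int)) :
    (if (d:Int) < 3 then (d:Int) + kk else (d:Int)) = ((pvAdj d k : Nat) : Int) := by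
  subst hk
  unfold pvAdj
  by_cases h : d < 3
  · rw [if_pos (by exact_mod_cast h), if_pos h]
    push_cast
    ring
  · rw [if_neg (by exact_mod_cast h), if_neg h]

theorem pv_chunk_lt (u k : Nat) : pvChunk u k < 32 := by
  unfold pvChunk
  have h : (u >>> k) &&& 31 < 2^5 := Nat.and_lt_two_pow _ (show (31:Nat) < 2^5 by norm_num)
  omega

theorem pv_adj_lt (d a : Nat) (hd : d < 32) (ha : a ≤ 29) : pvAdj d a < 32 := by
  unfold pvAdj
  split <;> omega

theorem pv_set_ite {c : Prop} [Decidable c] (l1 l2 : List Int) (i v : Int) :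
    PySem.List.pySetD (if c then l1 else l2) i v
      = if c then PySem.List.pySetD l1 i v else PySem.List.pySetD l2 i v :=
  apply_ite (fun l => PySem.List.pySetD l i v) c l1 l2

theorem pv_get_ite {c : Prop} [Decidable c] (l1 l2 : List Int) (i d : Int) :
    PySem.List.pyGetD (if c then l1 else l2) i d
      = if c then PySem.List.pyGetD l1 i d else PySem.List.pyGetD l2 i d :=
  apply_ite (fun l => PySem.List.pyGetD l i d) c l1 l2

theorem pv_set0 (a b c d v : Int) : PySem.List.pySetD [a,b,c,d] 0 v = [v,b,c,d] := rfl
theorem pv_set1 (a b c d v : Int) : PySem.List.pySetD [a,b,c,d] 1 v = [a,v,c,d] := rfl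
theorem pv_set2 (a b c d v : Int) : PySem.List.pySetD [a,b,c,d] 2 v = [a,b,v,d] := rfl
theorem pv_set3 (a b c d v : Int) : PySem.List.pySetD [a,b,c,d] 3 v = [a,b,c,v] := rfl
theorem pv_get0 (a b c d e : Int) : PySem.List.pyGetD [a,b,c,d] 0 e = a := rfl
theorem pv_get1 (a b c d e : Int) : PySem.List.pyGetD [a,b,c,d] 1 e = b := rfl
theorem pv_get2 (a b c d e : Int) : PySem.List.pyGetD [a,b,c,d] 2 e = c := rfl
theorem pv_get3 (a b c d e : Int) : PySem.List.pyGetD [a,b,c,d] 3 e = d := rfl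

theorem pv_A_eval (x : Int) (u : Nat) (hu : u < 2^20) (hne : x * 2^20 + (u:Int) ≠ 0) :
    convert_password_py (x * 2^20 + (u:Int)) =
      x * 2^20 + (pvAdj (pvChunk u 15) 21 : Int) * 2^15 + (pvAdj (pvChunk u 10) 17 : Int) * 2^10
        + (pvAdj (pvChunk u 5) 13 : Int) * 2^5 + (pvAdj (pvChunk u 0) 9 : Int) := by
  have hs5 : u >>> 5 < 2^15 := by
    rw [Nat.shiftRight_eq_div_pow]
    omega
  have hs10 : u >>> 10 < 2^10 := by
    rw [Nat.shiftRight_eq_div_pow]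
    omega
  have hs15 : u >>> 15 < 2^5 := by
    rw [Nat.shiftRight_eq_div_pow]
    omega
  have h20 : u >>> 20 = 0 := by
    rw [Nat.shiftRight_eq_div_pow]
    omega
  unfold convert_password_py
  rw [if_neg hne]
  rw [show PySem.List.pyRange 0 4 1 = [0,1,2,3] from by decide]
  simp only [List.foldl, List.replicate, pv_set_ite, pv_get_ite,
    pv_set0, pv_set1, pv_set2, pv_set3, pv_get0, pv_get1, pv_get2, pv_get3, ite_self,
    show (3:Int) - 0 = 3 from by norm_num, show (3:Int) - 1 = 2 from by norm_num,
    show (3:Int) - 2 = 1 from by norm_num, show (3:Int) - 3 = 0 from by norm_num]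
  rw [pv_shift_low x u 20 5 (by norm_num), show (20:Nat)-5 = 15 from rfl]
  rw [pv_shift_low x (u>>>5) 15 5 (by norm_num), show (15:Nat)-5 = 10 from rfl,
      show u>>>5>>>5 = u>>>10 from by rw [← Nat.shiftRight_add]]
  rw [pv_shift_low x (u>>>10) 10 5 (by norm_num), show (10:Nat)-5 = 5 from rfl,
      show u>>>10>>>5 = u>>>15 from by rw [← Nat.shiftRight_add]]
  rw [pv_shift_low x (u>>>15) 5 5 (by norm_num), show (5:Nat)-5 = 0 from rfl,
      show u>>>15>>>5 = u>>>20 from by rw [← Nat.shiftRight_add], h20]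
  simp only [Nat.cast_zero, add_zero, pow_zero, mul_one]
  simp only [show (31:Int) = ((31:Nat):Int) from by norm_num]
  rw [pv_band_low x u 31 20 hu (by norm_num),
      pv_band_low x (u >>> 5) 31 15 hs5 (by norm_num),
      pv_band_low x (u >>> 10) 31 10 hs10 (by norm_num),
      pv_band_low x (u >>> 15) 31 5 hs15 (by norm_num)]
  rw [show u &&& 31 = pvChunk u 0 from by simp [pvChunk],
      show u >>> 5 &&& 31 = pvChunk u 5 from rfl,
      show u >>> 10 &&& 31 = pvChunk u 10 from rfl,
      show u >>> 15 &&& 31 = pvChunk u 15 from rfl]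
  rw [pv_cast_if (pvChunk u 0) 9 (9 + 4*0) (by norm_num),
      pv_cast_if (pvChunk u 5) 13 (9 + 4) (by norm_num),
      pv_cast_if (pvChunk u 10) 17 (9 + 4*2) (by norm_num),
      pv_cast_if (pvChunk u 15) 21 (9 + 4*3) (by norm_num)]
  simp only [Int.shiftLeft_eq]
  have b0 := pv_adj_lt _ 9 (pv_chunk_lt u 0) (by norm_num)
  have b1 := pv_adj_lt _ 13 (pv_chunk_lt u 5) (by norm_num)
  have b2 := pv_adj_lt _ 17 (pv_chunk_lt u 10) (by norm_num)
  have b3 := pv_adj_lt _ 21 (pv_chunk_lt u 15) (by norm_num)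
  rw [pv_bor_low0 x (pvAdj (pvChunk u 15) 21) 5 (by omega)]
  rw [pv_bor_low0 _ (pvAdj (pvChunk u 10) 17) 5 (by omega)]
  rw [pv_bor_low0 _ (pvAdj (pvChunk u 5) 13) 5 (by omega)]
  rw [pv_bor_low0 _ (pvAdj (pvChunk u 0) 9) 5 (by omega)]
  push_cast
  ring

-- one step of the recursion, i < 4
theorem pv_enc_step (p i : Int) (h : i < 4) :
    convert_password_py_encode p i =
      convert_password_py_encode (PySem.Int.floordiv p 32) (i + 1) * 32 +
        (if PySem.Int.mod p 32 < 3 then PySem.Int.mod p 32 + (9 + 4 * i) else PySem.Int.mod p 32) := by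
  rw [convert_password_py_encode]
  rw [if_neg (by omega)]

theorem pv_enc_base (p : Int) : convert_password_py_encode p 4 = p := by
  rw [convert_password_py_encode]
  norm_num

-- Python (x*2^n + u) % 32 = u % 32 for 5 ≤ n, 0 ≤ u
theorem pv_mod_low (x : Int) (u n : Nat) (h5 : 5 ≤ n) :
    PySem.Int.mod (x * 2^n + (u:Int)) 32 = ((u % 32 : Nat) : Int) := by
  rw [PySem.Int.mod_eq_emod_of_pos (by norm_num : (0:Int) < 32)]
  have h2 : (2:Int)^n = 2^(n-5) * 32 := by
    rw [show (32:Int) = 2^5 from by norm_num, ← pow_add]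
    congr 1
    omega
  rw [h2, ← mul_assoc, add_comm]
  generalize x * 2 ^ (n - 5) = y
  omega

-- Python (x*2^n + u) // 32 = x*2^(n-5) + (u >> 5) for 5 ≤ n, 0 ≤ u
theorem pv_fdiv_low (x : Int) (u n : Nat) (h5 : 5 ≤ n) :
    PySem.Int.floordiv (x * 2^n + (u:Int)) 32 = x * (2:Int)^(n-5) + ((u >>> 5 : Nat) : Int) := by
  rw [PySem.Int.floordiv_eq_ediv_of_pos (by norm_num : (0:Int) < 32)]
  have h2 : (2:Int)^n = 2^(n-5) * 32 := by
    rw [show (32:Int) = 2^5 from by norm_num, ← pow_add]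
    congr 1
    omega
  rw [h2, ← mul_assoc, add_comm, Int.add_mul_ediv_right _ _ (by norm_num : (32:Int) ≠ 0)]
  rw [Nat.shiftRight_eq_div_pow, show (2:Nat)^5 = 32 from rfl]
  push_cast [Int.natCast_ediv]
  ring

theorem pv_chunk_mod (u k : Nat) : (u >>> k) % 32 = pvChunk u k := by
  unfold pvChunk
  rw [show (31:Nat) = 2^5 - 1 from rfl, Nat.and_two_pow_sub_one_eq_mod]

theorem pv_B_eval (x : Int) (u : Nat) (hu : u < 2^20) (hne : x * 2^20 + (u:Int) ≠ 0) :
    convert_password_py_alt (x * 2^20 + (u:Int)) =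
      x * 2^20 + (pvAdj (pvChunk u 15) 21 : Int) * 2^15 + (pvAdj (pvChunk u 10) 17 : Int) * 2^10
        + (pvAdj (pvChunk u 5) 13 : Int) * 2^5 + (pvAdj (pvChunk u 0) 9 : Int) := by
  have h20 : u >>> 20 = 0 := by
    rw [Nat.shiftRight_eq_div_pow]
    omega
  unfold convert_password_py_alt
  rw [if_neg hne]
  rw [pv_enc_step _ 0 (by norm_num), show (0:Int)+1 = 1 from by norm_num]
  rw [pv_enc_step _ 1 (by norm_num), show (1:Int)+1 = 2 from by norm_num]
  rw [pv_enc_step _ 2 (by norm_num), show (2:Int)+1 = 3 from by norm_num]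
  rw [pv_enc_step _ 3 (by norm_num), show (3:Int)+1 = 4 from by norm_num]
  rw [pv_enc_base]
  rw [pv_fdiv_low x u 20 (by norm_num), show (20:Nat)-5 = 15 from rfl]
  rw [pv_fdiv_low x (u>>>5) 15 (by norm_num), show (15:Nat)-5 = 10 from rfl,
      show u>>>5>>>5 = u>>>10 from by rw [← Nat.shiftRight_add]]
  rw [pv_fdiv_low x (u>>>10) 10 (by norm_num), show (10:Nat)-5 = 5 from rfl,
      show u>>>10>>>5 = u>>>15 from by rw [← Nat.shiftRight_add]]
  rw [pv_fdiv_low x (u>>>15) 5 (by norm_num), show (5:Nat)-5 = 0 from rfl,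
      show u>>>15>>>5 = u>>>20 from by rw [← Nat.shiftRight_add], h20]
  simp only [Nat.cast_zero, add_zero, pow_zero, mul_one]
  rw [pv_mod_low x u 20 (by norm_num),
      pv_mod_low x (u>>>5) 15 (by norm_num),
      pv_mod_low x (u>>>10) 10 (by norm_num),
      pv_mod_low x (u>>>15) 5 (by norm_num)]
  rw [show u % 32 = pvChunk u 0 from by rw [← pv_chunk_mod u 0, Nat.shiftRight_zero],
      pv_chunk_mod u 5, pv_chunk_mod u 10, pv_chunk_mod u 15]
  rw [pv_cast_if (pvChunk u 0) 9 (9 + 4*0) (by norm_num),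
      pv_cast_if (pvChunk u 5) 13 (9 + 4) (by norm_num),
      pv_cast_if (pvChunk u 10) 17 (9 + 4*2) (by norm_num),
      pv_cast_if (pvChunk u 15) 21 (9 + 4*3) (by norm_num)]
  ring

-- ===== VERDICT (by name: the statement is the Claim_ definition above) =====
theorem convert_password_py_spec : Claim_equal_convert_password_py := by
  intro p _
  unfold Spec_convert_password_py
  by_cases hp : p = 0
  · simp [convert_password_py, convert_password_py_alt, hp]
  · obtain ⟨x, u, hu, rfl⟩ : ∃ (x : Int) (u : Nat), u < 2^20 ∧ p = x * 2^20 + (u:Int) := by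
      refine ⟨p / 2^20, (p % 2^20).toNat, ?_, ?_⟩
      · have h1 : (0:Int) < 2^20 := by norm_num
        have := Int.emod_lt_of_pos p h1
        have := Int.emod_nonneg p (by norm_num : (2:Int)^20 ≠ 0)
        omega
      · omega
    rw [pv_A_eval x u hu hp, pv_B_eval x u hu hp]
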